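-- pv_equiv track=rewrite | github.com/Gipsy-The-Sheller/YR-MPE | YR_MPE/plugins/mrbayes_plugin.py | _clean_taxon_name
-- ===== SOURCE A (Python) =====
-- def _clean_taxon_name(name):
--     """清理分类名称中的特殊字符，替换为下划线"""
--     if not name:
--         return name
--
--     # 将空格和标点符号替换为下划线
--     import string
--     # 允许的字符：字母、数字、下划线
--     allowed_chars = set(string.ascii_letters + string.digits + '_')
--
--     cleaned = []
--     for char in name:
--         if char in allowed_chars:
--             cleaned.append(char)
--         else:
--             cleaned.append('_')  # 将其他字符替换为下划线
--
--     # 避免连续的下划线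
--     result = ''.join(cleaned)
--     while '__' in result:
--         result = result.replace('__', '_')
--
--     # 避免以非字母开头
--     if result and result[0] not in string.ascii_letters:
--         result = 'T_' + result
--
--     return result
-- ===== SOURCE B (Python) =====
-- def _clean_taxon_name(name):
--     """Sanitize a taxon name: run-based single pass (groupby) instead of per-char build + repeated '__' rescans."""
--     if not name:
--         return name
--     import string
--     from itertools import groupby
--     letters = set(string.ascii_letters)
--     alnum = letters | set(string.digits)
--     result = ''.join(''.join(g) if k else '_'
--                      for k, g in groupby(name, key=lambda c: c in alnum))
--     if result[0] not in letters:
--         result = 'T_' + result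
--     return result
-- ===== Notes on version B (the rewrite author's own statement) =====
-- stated objective: simpler
-- what changed: Replaces the per-character append loop plus repeated while-'__'-replace rescans with one run-based pass (itertools.groupby): each maximal run of allowed characters is kept, each maximal run of disallowed-or-underscore characters becomes a single '_'.
import Mathlib
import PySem

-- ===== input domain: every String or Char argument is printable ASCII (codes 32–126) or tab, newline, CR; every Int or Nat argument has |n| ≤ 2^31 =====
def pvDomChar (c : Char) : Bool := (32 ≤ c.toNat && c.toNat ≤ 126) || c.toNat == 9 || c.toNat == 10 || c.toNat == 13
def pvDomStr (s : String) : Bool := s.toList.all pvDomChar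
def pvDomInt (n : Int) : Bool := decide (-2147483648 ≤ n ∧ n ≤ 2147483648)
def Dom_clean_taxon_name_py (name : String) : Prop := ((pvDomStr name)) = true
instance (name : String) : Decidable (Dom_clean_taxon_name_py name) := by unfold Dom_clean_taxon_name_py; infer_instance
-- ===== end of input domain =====

-- B replaces A's per-char build plus repeated '__'-replace rescans by one run-based pass (groupby); return values are proved equal on all of Dom.

-- ===== PORT A =====

-- char in allowed_chars = ascii_letters + digits + '_' (exact: Char.isAlpha/isDigit are ASCII-only)
def pvAllowed (c : Char) : Bool := c.isAlpha || c.isDigit || c == '_'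

-- hand port of str.replace('__', '_'): left-to-right, non-overlapping replacement (exact; the needle is ASCII)
def pvRep : List Char → List Char
  | [] => []
  | [c] => [c]
  | a :: b :: r => if a == '_' && b == '_' then '_' :: pvRep r else a :: pvRep (b :: r)

-- hand port of ('__' in result): consecutive-underscore test (exact)
def pvHas : List Char → Bool
  | [] => false
  | [_] => false
  | a :: b :: r => if a == '_' && b == '_' then true else pvHas (b :: r)

-- termination facts the port's while-loop needs (cited in decreasing_by)
theorem pvRep_len_le : ∀ s : List Char, (pvRep s).length ≤ s.length := by
  intro s
  induction s using pvRep.induct with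
  | case1 => simp [pvRep]
  | case2 c => simp [pvRep]
  | case3 a b r h ih => simp [pvRep, h]; omega
  | case4 a b r h ih => simp only [pvRep, if_neg h, List.length_cons] at *; omega

theorem pvRep_len_lt : ∀ s : List Char, pvHas s = true → (pvRep s).length < s.length := by
  intro s hs
  induction s using pvRep.induct with
  | case1 => simp [pvHas] at hs
  | case2 c => simp [pvHas] at hs
  | case3 a b r h ih =>
      have := pvRep_len_le r
      simp [pvRep, h]; omega
  | case4 a b r h ih =>
      rw [pvHas, if_neg h] at hs
      simp only [pvRep, if_neg h, List.length_cons]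
      exact Nat.succ_lt_succ (ih hs)

-- literal port of: while '__' in result: result = result.replace('__', '_')
def pvWhileCollapse (s : List Char) : List Char :=
  if h : pvHas s = true then pvWhileCollapse (pvRep s) else s
termination_by s.length
decreasing_by exact pvRep_len_lt s h

def clean_taxon_name_py (name : String) : String :=
  if name = "" then name
  else
    let cleaned := name.toList.map (fun c => if pvAllowed c then c else '_')
    let result := pvWhileCollapse cleaned
    let result := if !result.isEmpty && !(result.headD ' ').isAlpha then 'T' :: '_' :: result else result
    String.ofList result

-- ===== PORT B =====

def pvAlnum (c : Char) : Bool := c.isAlpha || c.isDigit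

-- the groupby pass: a maximal alnum run is kept verbatim, a maximal non-alnum run becomes one '_'
def pvRuns : List Char → List Char
  | [] => []
  | c :: r =>
      if pvAlnum c then c :: pvRuns r
      else '_' :: pvRuns (r.dropWhile (fun d => !pvAlnum d))
termination_by s => s.length
decreasing_by
  · simp
  · have := List.length_dropWhile_le (fun d => !pvAlnum d) r; simp; omega

def clean_taxon_name_py_alt (name : String) : String :=
  if name = "" then name
  else
    let result := pvRuns name.toList
    let result := if (result.headD ' ').isAlpha then result else 'T' :: '_' :: result
    String.ofList result

-- ===== PRECONDITION & SPEC =====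
def Spec_clean_taxon_name_py (name : String) (out : String) : Prop := out = clean_taxon_name_py_alt name
instance (name : String) (out : String) : Decidable (Spec_clean_taxon_name_py name out) := by unfold Spec_clean_taxon_name_py; infer_instance

-- ===== CLAIM (what is proved, stated in full; the proofs are below) =====
def Claim_equal_clean_taxon_name_py : Prop := ∀ (name : String), Dom_clean_taxon_name_py name → Spec_clean_taxon_name_py name (clean_taxon_name_py name)

-- ===== LEMMAS AND PROOFS =====

-- canonical collapse of underscore runs: the common normal form of A's replace-loop and B's run pass
def pvCol : List Char → List Char
  | [] => []
  | c :: r =>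
      if c == '_' then '_' :: pvCol (r.dropWhile (· == '_'))
      else c :: pvCol r
termination_by s => s.length
decreasing_by
  · have := List.length_dropWhile_le (· == '_') r; simp; omega
  · simp

theorem pvCol_noHas : ∀ s : List Char, pvHas s = false → pvCol s = s := by
  intro s h
  induction s using pvCol.induct with
  | case1 => rw [pvCol]
  | case2 c r hc ih =>
      have hc' : c = '_' := by simpa using hc
      subst hc'
      cases r with
      | nil => simp [pvCol]
      | cons b r' =>
          have hb : ¬ b = '_' := by
            intro hb; subst hb; simp [pvHas] at h
          have h' : pvHas (b :: r') = false := by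
            rw [pvHas, if_neg (by simp [hb])] at h; exact h
          have hdw : (b :: r').dropWhile (· == '_') = b :: r' := by
            simp [hb]
          rw [hdw] at ih
          rw [pvCol, if_pos (by simp), hdw, ih h']
  | case3 c r hc ih =>
      cases r with
      | nil => simp [pvCol, hc]
      | cons b r' =>
          have h' : pvHas (b :: r') = false := by
            rw [pvHas, if_neg (by simp; intro hcc; exact absurd (by simp [hcc]) hc)] at h
            exact h
          rw [pvCol, if_neg hc, ih h']

theorem pvCol_rep : ∀ s : List Char,
    pvCol (pvRep s) = pvCol s ∧
    pvCol ((pvRep s).dropWhile (· == '_')) = pvCol (s.dropWhile (· == '_')) := by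
  intro s
  induction s using pvRep.induct with
  | case1 => exact ⟨rfl, rfl⟩
  | case2 c => exact ⟨rfl, rfl⟩
  | case3 a b r h ih =>
      have ha : a = '_' := by simp at h; exact h.1
      have hb : b = '_' := by simp at h; exact h.2
      subst ha; subst hb
      have e1 : pvRep ('_' :: '_' :: r) = '_' :: pvRep r := by rw [pvRep, if_pos h]
      constructor
      · rw [e1, pvCol, if_pos (by simp), pvCol, if_pos (by simp)]
        rw [List.dropWhile_cons, if_pos (by simp)]
        rw [ih.2]
      · rw [e1, List.dropWhile_cons, if_pos (by simp),
            List.dropWhile_cons, if_pos (by simp), List.dropWhile_cons, if_pos (by simp)]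
        exact ih.2
  | case4 a b r h ih =>
      have e1 : pvRep (a :: b :: r) = a :: pvRep (b :: r) := by rw [pvRep, if_neg h]
      by_cases ha : a = '_'
      · subst ha
        have hb : ¬ b = '_' := by intro hb; subst hb; simp at h
        have hdrop : (pvRep (b :: r)).dropWhile (· == '_') = pvRep (b :: r) := by
          cases r with
          | nil => simp [pvRep, hb]
          | cons c r' =>
              rw [pvRep, if_neg (by simp [hb])]
              simp [hb]
        have hdrop2 : (b :: r).dropWhile (· == '_') = b :: r := by
          simp [hb]
        constructor
        · rw [e1, pvCol, if_pos (by simp), pvCol, if_pos (by simp), hdrop, hdrop2, ih.1]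
        · rw [e1, List.dropWhile_cons, if_pos (by simp), List.dropWhile_cons, if_pos (by simp),
              hdrop, hdrop2, ih.1]
      · constructor
        · rw [e1, pvCol, if_neg (by simpa using ha), pvCol, if_neg (by simpa using ha), ih.1]
        · rw [e1, List.dropWhile_cons, if_neg (by simpa using ha),
              List.dropWhile_cons, if_neg (by simpa using ha),
              pvCol, if_neg (by simpa using ha), pvCol, if_neg (by simpa using ha), ih.1]

theorem pvWhileCollapse_eq_col : ∀ s : List Char, pvWhileCollapse s = pvCol s := by
  intro s
  induction s using pvWhileCollapse.induct with
  | case1 s h ih => rw [pvWhileCollapse, dif_pos h, ih, (pvCol_rep s).1]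
  | case2 s h => rw [pvWhileCollapse, dif_neg h, pvCol_noHas s (by simpa using h)]

theorem pvMap_underscore_dropWhile : ∀ t : List Char,
    (t.map (fun d => if pvAllowed d then d else '_')).dropWhile (· == '_')
      = (t.dropWhile (fun d => !pvAlnum d)).map (fun d => if pvAllowed d then d else '_') := by
  intro t
  induction t with
  | nil => rfl
  | cons d t' iht =>
      by_cases hd : pvAlnum d = true
      · have hdall : pvAllowed d = true := by simp [pvAllowed, pvAlnum] at hd ⊢; tauto
        have hdne : ¬ d = '_' := by
          intro hh; subst hh; exact absurd hd (by decide)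
        simp [List.dropWhile_cons, hdall, hdne, hd]
      · have hmd : (if pvAllowed d then d else '_') = '_' := by
          by_cases hall : pvAllowed d = true
          · have hdd : d = '_' := by
              simp [pvAlnum] at hd
              simpa [pvAllowed, hd.1, hd.2] using hall
            simp [hdd]
          · simp [hall]
        simp only [List.map_cons, hmd, List.dropWhile_cons]
        simp only [hd, Bool.not_false, if_true]
        simpa using iht

theorem pvCol_map_eq_runs : ∀ s : List Char,
    pvCol (s.map (fun c => if pvAllowed c then c else '_')) = pvRuns s := by
  intro s
  induction s using pvRuns.induct with
  | case1 => rw [List.map_nil, pvCol, pvRuns]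
  | case2 c r hc ih =>
      have hall : pvAllowed c = true := by simp [pvAllowed, pvAlnum] at hc ⊢; tauto
      have hne : ¬ c = '_' := by intro hh; subst hh; exact absurd hc (by decide)
      rw [List.map_cons, if_pos hall, pvCol, if_neg (by simpa using hne), ih,
          pvRuns, if_pos hc]
  | case3 c r hc ih =>
      have hmap : (if pvAllowed c then c else '_') = '_' := by
        by_cases hall : pvAllowed c = true
        · have hcc : c = '_' := by
            simp [pvAlnum] at hc
            simpa [pvAllowed, hc.1, hc.2] using hall
          simp [hcc]
        · simp [hall]
      rw [List.map_cons, hmap, pvCol, if_pos (by simp), pvMap_underscore_dropWhile, ih,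
          pvRuns, if_neg (by simpa using hc)]

theorem pvRuns_ne_nil (c : Char) (r : List Char) : pvRuns (c :: r) ≠ [] := by
  rw [pvRuns]; split <;> simp

-- ===== VERDICT (by name: the statement is the Claim_ definition above) =====
theorem clean_taxon_name_py_spec : Claim_equal_clean_taxon_name_py := by
  intro name _
  unfold Spec_clean_taxon_name_py clean_taxon_name_py clean_taxon_name_py_alt
  by_cases h : name = ""
  · simp [h]
  · simp only [if_neg h]
    rw [pvWhileCollapse_eq_col, pvCol_map_eq_runs]
    have hne : pvRuns name.toList ≠ [] := by
      cases hl : name.toList with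
      | nil =>
          exfalso
          have := String.ofList_toList (s := name)
          rw [hl] at this
          exact h this.symm
      | cons c r => exact pvRuns_ne_nil c r
    cases hb : ((pvRuns name.toList).headD ' ').isAlpha <;>
      simp_all [List.headD_eq_head?_getD]
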